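-- pv_equiv track=rewrite | github.com/taketwo/mcf | apps/bam/src/bam/pulseaudio.py | _select_headset_profile
-- ===== SOURCE A (Python) =====
-- from enum import Enum
--
-- class AudioProfile(str, Enum):
--     """Audio profiles for Bluetooth devices."""
--
--     A2DP_SINK = "a2dp-sink"
--     HSP = "headset-head-unit"
--     HFP = "handsfree-head-unit"
--
-- def _select_headset_profile(profile_names: list[str]) -> str | None:
--     """Pick an HSP/HFP card profile, preferring mSBC over CVSD over generic."""
--     hsp = AudioProfile.HSP.value
--     hfp = AudioProfile.HFP.value
--     headsets = [n for n in profile_names if n == hsp or n.startswith(f"{hsp}-")]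
--     if not headsets:
--         hfps = [n for n in profile_names if n.startswith(hfp)]
--         return hfps[0] if hfps else None
--     for preferred in (f"{hsp}-msbc", f"{hsp}-cvsd", hsp):
--         if preferred in headsets:
--             return preferred
--     return headsets[0]
-- ===== SOURCE B (Python) =====
-- def _select_headset_profile(profile_names):
--     """Pick an HSP/HFP card profile, preferring mSBC over CVSD over generic.
--
--     Single pass with an accumulator: track the best-ranked headset profile
--     seen so far and the first HFP-prefixed name, no intermediate lists.
--     """
--     hsp = "headset-head-unit"
--     hfp = "handsfree-head-unit"
--     best_rank = 4
--     best = None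
--     first_hfp = None
--     for n in profile_names:
--         if n == hsp or n.startswith(hsp + "-"):
--             rank = 0 if n == hsp + "-msbc" else 1 if n == hsp + "-cvsd" else 2 if n == hsp else 3
--             if rank < best_rank:
--                 best_rank = rank
--                 best = n
--         if first_hfp is None and n.startswith(hfp):
--             first_hfp = n
--     return best if best is not None else first_hfp
-- ===== Notes on version B (the rewrite author's own statement) =====
-- stated objective: alternative
-- what changed: Replaces A's staged passes (build a headsets list, probe it with three ordered membership tests, fall back to headsets[0], else build an hfps list and index it) with one fused loop over profile_names that maintains an accumulator (best rank + best headset so far, first hfp-prefixed name) and decides from the final accumulator; no intermediate lists.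
import Mathlib
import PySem

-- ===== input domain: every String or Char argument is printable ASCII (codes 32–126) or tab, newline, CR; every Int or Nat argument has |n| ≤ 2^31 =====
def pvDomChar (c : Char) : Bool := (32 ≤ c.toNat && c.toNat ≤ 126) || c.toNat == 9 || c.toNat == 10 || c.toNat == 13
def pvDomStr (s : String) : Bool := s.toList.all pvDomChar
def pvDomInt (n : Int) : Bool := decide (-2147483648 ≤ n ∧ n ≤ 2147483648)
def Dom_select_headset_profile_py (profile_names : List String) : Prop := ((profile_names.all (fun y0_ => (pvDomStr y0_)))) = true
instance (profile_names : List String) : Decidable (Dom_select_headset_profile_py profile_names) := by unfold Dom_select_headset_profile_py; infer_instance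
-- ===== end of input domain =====

-- B replaces A's staged passes (headsets list + ordered probe + hfps list) with one
-- fused loop maintaining an accumulator (best-ranked headset, first hfp); objective: alternative.


-- ===== PORT A =====
-- hsp = "headset-head-unit", hfp = "handsfree-head-unit"; the f-strings f"{hsp}-",
-- f"{hsp}-msbc", f"{hsp}-cvsd" are written as the string literals they denote.
def select_headset_profile_py (profile_names : List String) : Option String :=
  let headsets := profile_names.filter
    (fun n => n == "headset-head-unit" || PySem.Str.startswith n "headset-head-unit-")
  if headsets.isEmpty then
    let hfps := profile_names.filter (fun n => PySem.Str.startswith n "handsfree-head-unit")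
    match hfps with
    | [] => none
    | x :: _ => some x          -- hfps[0]
  else
    -- for preferred in (f"{hsp}-msbc", f"{hsp}-cvsd", hsp): if preferred in headsets: return preferred
    match List.find? (fun p => headsets.contains p)
        ["headset-head-unit-msbc", "headset-head-unit-cvsd", "headset-head-unit"] with
    | some p => some p
    | none => headsets.head?    -- headsets[0]; headsets is nonempty in this branch

-- ===== PORT B =====
-- Source B's rank expression: 0 if n == hsp+"-msbc" else 1 if n == hsp+"-cvsd" else 2 if n == hsp else 3
def pvRank (n : String) : Int :=
  if n == "headset-head-unit-msbc" then 0
  else if n == "headset-head-unit-cvsd" then 1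
  else if n == "headset-head-unit" then 2
  else 3

-- one iteration of Source B's loop over state (best_rank, best, first_hfp)
def pvStepB (st : Int × Option String × Option String) (n : String) :
    Int × Option String × Option String :=
  let rb :=
    if n == "headset-head-unit" || PySem.Str.startswith n "headset-head-unit-" then
      if pvRank n < st.1 then (pvRank n, some n) else (st.1, st.2.1)
    else (st.1, st.2.1)
  let f :=
    if st.2.2.isNone && PySem.Str.startswith n "handsfree-head-unit" then some n else st.2.2
  (rb.1, rb.2, f)

def select_headset_profile_py_alt (profile_names : List String) : Option String :=
  let st := profile_names.foldl pvStepB (4, none, none)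
  match st.2.1 with
  | some b => some b              -- best if best is not None
  | none => st.2.2                -- else first_hfp

-- ===== PRECONDITION & SPEC =====
def Spec_select_headset_profile_py (profile_names : List String) (out : Option String) : Prop := out = select_headset_profile_py_alt profile_names
instance (profile_names : List String) (out : Option String) : Decidable (Spec_select_headset_profile_py profile_names out) := by unfold Spec_select_headset_profile_py; infer_instance

-- ===== CLAIM (what is proved, stated in full; the proofs are below) =====
def Claim_equal_select_headset_profile_py : Prop := ∀ (profile_names : List String), Dom_select_headset_profile_py profile_names → Spec_select_headset_profile_py profile_names (select_headset_profile_py profile_names)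

-- ===== LEMMAS AND PROOFS =====

-- proof-only decompositions of pvStepB's state update
def pvHead (n : String) : Bool :=
  n == "headset-head-unit" || PySem.Str.startswith n "headset-head-unit-"

def pvStep2 (p : Int × Option String) (n : String) : Int × Option String :=
  if pvHead n then (if pvRank n < p.1 then (pvRank n, some n) else p) else p

def pvStepF (f : Option String) (n : String) : Option String :=
  if f.isNone && PySem.Str.startswith n "handsfree-head-unit" then some n else f

def pvMinStep (acc : Option String) (x : String) : Option String :=
  match acc with
  | none => some x
  | some m => if pvRank x < pvRank m then some x else some m

def pvRankOpt : Option String → Int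
  | none => 4
  | some a => pvRank a

theorem pvRank_le_three (n : String) : pvRank n ≤ 3 := by
  unfold pvRank; split_ifs <;> decide

theorem pvRank_nonneg (n : String) : 0 ≤ pvRank n := by
  unfold pvRank; split_ifs <;> decide

theorem pvRank_eq_zero {n : String} (h : pvRank n = 0) :
    n = "headset-head-unit-msbc" := by
  unfold pvRank at h
  split_ifs at h with h1 h2 h3
  · exact eq_of_beq h1
  · exact absurd h (by decide)
  · exact absurd h (by decide)
  · exact absurd h (by decide)

theorem pvRank_le_one {n : String} (h : pvRank n ≤ 1) :
    n = "headset-head-unit-msbc" ∨ n = "headset-head-unit-cvsd" := by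
  unfold pvRank at h
  split_ifs at h with h1 h2 h3
  · exact Or.inl (eq_of_beq h1)
  · exact Or.inr (eq_of_beq h2)
  · exact absurd h (by decide)
  · exact absurd h (by decide)

theorem pvRank_le_two {n : String} (h : pvRank n ≤ 2) :
    n = "headset-head-unit-msbc" ∨ n = "headset-head-unit-cvsd" ∨ n = "headset-head-unit" := by
  unfold pvRank at h
  split_ifs at h with h1 h2 h3
  · exact Or.inl (eq_of_beq h1)
  · exact Or.inr (Or.inl (eq_of_beq h2))
  · exact Or.inr (Or.inr (eq_of_beq h3))
  · exact absurd h (by decide)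

-- the fused fold decouples into the (rank, best) fold and the first-hfp fold
theorem pvFold_decouple (l : List String) :
    ∀ (r : Int) (b f : Option String),
      l.foldl pvStepB (r, b, f) =
        ((l.foldl pvStep2 (r, b)).1, (l.foldl pvStep2 (r, b)).2, l.foldl pvStepF f) := by
  induction l with
  | nil => intro r b f; rfl
  | cons n l ih =>
      intro r b f
      rw [List.foldl_cons, List.foldl_cons, List.foldl_cons]
      have hstep : pvStepB (r, b, f) n =
          ((pvStep2 (r, b) n).1, (pvStep2 (r, b) n).2, pvStepF f n) := by
        simp only [pvStepB, pvStep2, pvStepF, pvHead]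
      rw [hstep, ih]

theorem pvStepF_some (l : List String) (x : String) :
    l.foldl pvStepF (some x) = some x := by
  induction l with
  | nil => rfl
  | cons n l ih => rw [List.foldl_cons]; exact ih

theorem pvStepF_none (l : List String) :
    l.foldl pvStepF none =
      List.find? (fun n => PySem.Str.startswith n "handsfree-head-unit") l := by
  induction l with
  | nil => rfl
  | cons n l ih =>
      rw [List.foldl_cons, List.find?]
      by_cases h : PySem.Str.startswith n "handsfree-head-unit"
      · simp only [pvStepF, Option.isNone_none, Bool.true_and, h, if_pos, pvStepF_some]
      · simp only [pvStepF, Option.isNone_none, Bool.true_and, h, if_neg, Bool.false_eq_true,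
          not_false_iff, ih]

-- the (rank, best) fold is the running-min-by-rank over the headset filter
theorem pvStep2_min (l : List String) :
    ∀ (b : Option String),
      (l.foldl pvStep2 (pvRankOpt b, b)).2 = (l.filter pvHead).foldl pvMinStep b := by
  induction l with
  | nil => intro b; rfl
  | cons n l ih =>
      intro b
      rw [List.foldl_cons, List.filter_cons]
      by_cases h : pvHead n
      · simp only [h, if_pos, List.foldl_cons]
        cases b with
        | none =>
            have h4 : pvRank n < 4 := lt_of_le_of_lt (pvRank_le_three n) (by decide)
            rw [show pvStep2 (pvRankOpt none, none) n = (pvRankOpt (some n), some n) by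
              simp only [pvStep2, h, if_pos, pvRankOpt, if_pos h4]]
            rw [ih (some n)]; rfl
        | some a =>
            by_cases hlt : pvRank n < pvRank a
            · rw [show pvStep2 (pvRankOpt (some a), some a) n = (pvRankOpt (some n), some n) by
                simp [pvStep2, h, pvRankOpt, if_pos hlt]]
              rw [ih (some n)]
              simp [pvMinStep, if_pos hlt]
            · rw [show pvStep2 (pvRankOpt (some a), some a) n = (pvRankOpt (some a), some a) by
                simp [pvStep2, h, pvRankOpt, if_neg hlt]]
              rw [ih (some a)]
              simp [pvMinStep, if_neg hlt]
      · simp only [h, Bool.false_eq_true, if_neg, not_false_iff]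
        rw [show pvStep2 (pvRankOpt b, b) n = (pvRankOpt b, b) by simp [pvStep2, h]]
        exact ih b

theorem pvMinFold_eq_min? (hs : List String) :
    hs.foldl pvMinStep none = PySem.List.min? hs pvRank := by
  unfold PySem.List.min?
  congr 1
  funext acc x
  cases acc <;> rfl

theorem pvMinFold_const (a : String) (t : List String) (ha : pvRank a = 3)
    (hall : ∀ x ∈ t, pvRank x = 3) : t.foldl pvMinStep (some a) = some a := by
  induction t with
  | nil => rfl
  | cons c u ih =>
      rw [List.foldl_cons]
      rw [show pvMinStep (some a) c = some a by
        simp [pvMinStep, hall c (by simp), ha]]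
      exact ih (fun x hx => hall x (by simp [hx]))

theorem pvMin?_rank (hs : List String) (hne : hs ≠ []) :
    PySem.List.min? hs pvRank =
      if "headset-head-unit-msbc" ∈ hs then some "headset-head-unit-msbc"
      else if "headset-head-unit-cvsd" ∈ hs then some "headset-head-unit-cvsd"
      else if "headset-head-unit" ∈ hs then some "headset-head-unit"
      else hs.head? := by
  split_ifs with h1 h2 h3
  · cases hmin : PySem.List.min? hs pvRank with
    | none => exact absurd ((PySem.List.min?_eq_none_iff hs pvRank).mp hmin) hne
    | some m =>
        have hle : pvRank m ≤ 0 := by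
          have hv : pvRank "headset-head-unit-msbc" = 0 := by decide
          exact hv ▸ PySem.List.min?_isMin hmin _ h1
        have h0 : pvRank m = 0 := le_antisymm hle (pvRank_nonneg m)
        rw [pvRank_eq_zero h0]
  · cases hmin : PySem.List.min? hs pvRank with
    | none => exact absurd ((PySem.List.min?_eq_none_iff hs pvRank).mp hmin) hne
    | some m =>
        have hle : pvRank m ≤ 1 := by
          have hv : pvRank "headset-head-unit-cvsd" = 1 := by decide
          exact hv ▸ PySem.List.min?_isMin hmin _ h2
        rcases pvRank_le_one hle with h | h
        · exact absurd (h ▸ PySem.List.min?_mem hmin) h1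
        · rw [h]
  · cases hmin : PySem.List.min? hs pvRank with
    | none => exact absurd ((PySem.List.min?_eq_none_iff hs pvRank).mp hmin) hne
    | some m =>
        have hle : pvRank m ≤ 2 := by
          have hv : pvRank "headset-head-unit" = 2 := by decide
          exact hv ▸ PySem.List.min?_isMin hmin _ h3
        rcases pvRank_le_two hle with h | h | h
        · exact absurd (h ▸ PySem.List.min?_mem hmin) h1
        · exact absurd (h ▸ PySem.List.min?_mem hmin) h2
        · rw [h]
  · -- no preferred name present: every element has rank 3, min keeps the head
    cases hs with
    | nil => exact absurd rfl hne
    | cons a t =>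
        have hall : ∀ x ∈ a :: t, pvRank x = 3 := by
          intro x hx
          have hle3 := pvRank_le_three x
          by_contra hne3
          have hle2 : pvRank x ≤ 2 := by omega
          rcases pvRank_le_two hle2 with h | h | h
          · exact h1 (h ▸ hx)
          · exact h2 (h ▸ hx)
          · exact h3 (h ▸ hx)
        simp only [List.head?]
        rw [← pvMinFold_eq_min?, List.foldl_cons]
        show t.foldl pvMinStep (pvMinStep none a) = some a
        exact pvMinFold_const a t (hall a (by simp)) (fun x hx => hall x (by simp [hx]))

-- ===== VERDICT (by name: the statement is the Claim_ definition above) =====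
theorem select_headset_profile_py_spec : Claim_equal_select_headset_profile_py := by
  intro names _
  unfold Spec_select_headset_profile_py select_headset_profile_py select_headset_profile_py_alt
  have hdec := pvFold_decouple names 4 none none
  have h2 : (names.foldl pvStep2 (4, none)).2 =
      PySem.List.min? (names.filter pvHead) pvRank := by
    rw [show ((4 : Int), (none : Option String)) = (pvRankOpt none, none) from rfl,
      pvStep2_min, pvMinFold_eq_min?]
  simp only [hdec, h2, pvStepF_none]
  cases hfs : names.filter pvHead with
  | nil =>
      rw [show names.filter
          (fun n => n == "headset-head-unit" || PySem.Str.startswith n "headset-head-unit-") =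
          names.filter pvHead from rfl, hfs]
      simp only [List.isEmpty_nil, if_true, PySem.List.min?]
      rw [← List.head?_filter]
      cases names.filter (fun n => PySem.Str.startswith n "handsfree-head-unit") <;> rfl
  | cons h t =>
      rw [show names.filter
          (fun n => n == "headset-head-unit" || PySem.Str.startswith n "headset-head-unit-") =
          names.filter pvHead from rfl, hfs]
      simp only [List.isEmpty_cons]
      rw [pvMin?_rank _ (by simp)]
      simp only [List.find?]
      by_cases h1 : "headset-head-unit-msbc" ∈ h :: t
      · simp [h1]
      · by_cases hc2 : "headset-head-unit-cvsd" ∈ h :: t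
        · simp [h1, hc2]
        · by_cases h3 : "headset-head-unit" ∈ h :: t
          · simp [h1, hc2, h3]
          · simp [h1, hc2, h3]
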